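-- pv_equiv track=rewrite | github.com/w00tzenheimer/d810-ng | src/d810/optimizers/microcode/flow/flattening/hodur/strategies/inner_merge_duplication.py | _blocks_in_nontrivial_sccs
-- ===== SOURCE A (Python) =====
-- def _compute_sccs(
--     adj: dict[int, list[int]],
--     all_nodes: set[int],
-- ) -> list[frozenset[int]]:
--     """Compute strongly connected components using iterative Tarjan's algorithm.
--
--     Args:
--         adj: Adjacency list (serial -> list of successor serials).
--         all_nodes: Complete set of node serials in the graph.
--
--     Returns:
--         List of SCCs, each as a frozenset of block serials.
--         Single-node SCCs without self-loops are included but filtered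
--         by callers.
--     """
--     index_counter = [0]
--     node_index: dict[int, int] = {}
--     node_lowlink: dict[int, int] = {}
--     on_stack: set[int] = set()
--     stack: list[int] = []
--     sccs: list[frozenset[int]] = []
--
--     for node in sorted(all_nodes):
--         if node in node_index:
--             continue
--         # Iterative DFS using an explicit work stack.
--         # Each frame is (node, successor_iterator, is_root_call).
--         work: list[tuple[int, int]] = []  # (node, succ_index)
--         work.append((node, 0))
--         node_index[node] = index_counter[0]
--         node_lowlink[node] = index_counter[0]
--         index_counter[0] += 1
--         stack.append(node)
--         on_stack.add(node)
--
--         while work: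
--             v, si = work[-1]
--             succs = adj.get(v, [])
--             if si < len(succs):
--                 work[-1] = (v, si + 1)
--                 w = succs[si]
--                 if w not in node_index:
--                     # Tree edge: push w
--                     node_index[w] = index_counter[0]
--                     node_lowlink[w] = index_counter[0]
--                     index_counter[0] += 1
--                     stack.append(w)
--                     on_stack.add(w)
--                     work.append((w, 0))
--                 elif w in on_stack:
--                     node_lowlink[v] = min(node_lowlink[v], node_index[w])
--             else:
--                 # All successors processed; check if v is SCC root.
--                 if node_lowlink[v] == node_index[v]:
--                     scc_members: list[int] = []
--                     while True:
--                         w = stack.pop()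
--                         on_stack.discard(w)
--                         scc_members.append(w)
--                         if w == v:
--                             break
--                     sccs.append(frozenset(scc_members))
--                 # Pop frame and propagate lowlink to parent.
--                 work.pop()
--                 if work:
--                     parent = work[-1][0]
--                     node_lowlink[parent] = min(
--                         node_lowlink[parent], node_lowlink[v]
--                     )
--
--     return sccs
--
-- def _blocks_in_nontrivial_sccs(
--     adj: dict[int, list[int]],
--     all_nodes: set[int],
-- ) -> frozenset[int]:
--     """Return the set of block serials that belong to non-trivial SCCs.
--
--     A non-trivial SCC is one with more than one node, OR a single node
--     with a self-loop.
--
--     Args: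
--         adj: Adjacency list.
--         all_nodes: Complete set of node serials.
--
--     Returns:
--         Frozenset of block serials inside loops.
--     """
--     sccs = _compute_sccs(adj, all_nodes)
--     in_loop: set[int] = set()
--     for scc in sccs:
--         if len(scc) > 1:
--             in_loop.update(scc)
--         elif len(scc) == 1:
--             (sole,) = scc
--             if sole in adj.get(sole, []):
--                 in_loop.add(sole)
--     return frozenset(in_loop)
-- ===== SOURCE B (Python) =====
-- def _blocks_in_nontrivial_sccs(adj, all_nodes):
--     """Textbook recursive Tarjan instead of A's explicit work-stack machine;
--     the SCC list is then filtered by a single comprehension."""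
--     index = {}
--     lowlink = {}
--     on_stack = set()
--     stack = []
--     sccs = []
--     counter = [0]
--
--     def strongconnect(v):
--         index[v] = lowlink[v] = counter[0]
--         counter[0] += 1
--         stack.append(v)
--         on_stack.add(v)
--         for w in adj.get(v, []):
--             if w not in index:
--                 strongconnect(w)
--                 lowlink[v] = min(lowlink[v], lowlink[w])
--             elif w in on_stack:
--                 lowlink[v] = min(lowlink[v], index[w])
--         if lowlink[v] == index[v]:
--             scc = []
--             while True:
--                 w = stack.pop()
--                 on_stack.discard(w)
--                 scc.append(w)
--                 if w == v:
--                     break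
--             sccs.append(scc)
--
--     for node in sorted(all_nodes):
--         if node not in index:
--             strongconnect(node)
--
--     return frozenset(
--         b for scc in sccs for b in scc if len(scc) > 1 or b in adj.get(b, [])
--     )
-- ===== Notes on version B (the rewrite author's own statement) =====
-- stated objective: simpler
-- what changed: A's explicit work-stack state machine (frames of (node, successor-index) with manual lowlink propagation on frame pop) is replaced by the textbook recursive strongconnect formulation of Tarjan's SCC search, and A's imperative filter loop over the SCC list by a single comprehension; same asymptotic cost.
import Mathlib
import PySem

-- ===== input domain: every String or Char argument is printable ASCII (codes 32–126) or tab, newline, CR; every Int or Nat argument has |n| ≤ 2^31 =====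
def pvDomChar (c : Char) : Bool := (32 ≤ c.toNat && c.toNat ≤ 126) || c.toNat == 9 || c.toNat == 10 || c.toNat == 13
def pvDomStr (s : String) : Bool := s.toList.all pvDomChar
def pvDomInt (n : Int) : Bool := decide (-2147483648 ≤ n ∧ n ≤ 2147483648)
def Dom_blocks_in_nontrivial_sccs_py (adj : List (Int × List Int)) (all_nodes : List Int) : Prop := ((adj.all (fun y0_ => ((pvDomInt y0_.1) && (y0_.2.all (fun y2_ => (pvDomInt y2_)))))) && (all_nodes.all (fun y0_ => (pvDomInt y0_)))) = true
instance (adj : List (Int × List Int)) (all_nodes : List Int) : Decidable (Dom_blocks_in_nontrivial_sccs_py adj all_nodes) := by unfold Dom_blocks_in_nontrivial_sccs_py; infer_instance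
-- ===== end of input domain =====

-- B replaces A's explicit work-stack Tarjan loop with the textbook recursive
-- formulation and A's filter loop with a single comprehension (objective:
-- simpler; same asymptotic cost).  Both ports return the frozenset as the list
-- of its distinct elements (insertion order); the comparison is set-valued.

-- ===== PORT A =====

-- Shared state record: both Pythons use exactly these six variables.
structure TjState where
  idx : PySem.Dict Int Int        -- node_index
  low : PySem.Dict Int Int        -- node_lowlink
  onstack : PySem.Set Int         -- on_stack
  stack : List Int                -- stack (Python list end = our head)
  sccs : List (List Int)          -- sccs (each frozenset as its member list, pop order)
  counter : Int                   -- index_counter[0]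
deriving Repr, DecidableEq

def tjInit : TjState := ⟨PySem.Dict.empty, PySem.Dict.empty, PySem.Set.empty, [], [], 0⟩

-- node_index[v] = c; node_lowlink[v] = c; c += 1; stack.append(v); on_stack.add(v)
def pushNode (v : Int) (s : TjState) : TjState :=
  { s with idx := s.idx.insert v s.counter, low := s.low.insert v s.counter,
           counter := s.counter + 1, stack := v :: s.stack,
           onstack := PySem.Set.add s.onstack v }

-- node_lowlink[v]  (key always present when read; getD is exact there)
def lowD (s : TjState) (v : Int) : Int := s.low.getD v 0
-- node_index[v]
def idxD (s : TjState) (v : Int) : Int := s.idx.getD v 0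

-- the inner 'while True: w = stack.pop(); on_stack.discard(w); scc_members.append(w); if w == v: break'
def popLoop (v : Int) : List Int → PySem.Set Int → List Int → List Int × PySem.Set Int × List Int
  | [], os, acc => (acc, os, [])          -- unreachable on real runs (v is always on the stack)
  | w :: st, os, acc =>
      let os' := PySem.Set.discard os w
      let acc' := acc ++ [w]
      if w = v then (acc', os', st) else popLoop v st os' acc'

-- 'if node_lowlink[v] == node_index[v]: …pop the SCC…; sccs.append(frozenset(scc_members))'
def rootCheck (v : Int) (s : TjState) : TjState :=
  if lowD s v = idxD s v then
    let r := popLoop v s.stack s.onstack []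
    { s with stack := r.2.2, onstack := r.2.1, sccs := s.sccs ++ [r.1] }
  else s

-- 'work.pop(); if work: parent = work[-1][0]; node_lowlink[parent] = min(node_lowlink[parent], node_lowlink[v])'
def propagate (rest : List (Int × Nat)) (v : Int) (s : TjState) : TjState :=
  match rest with
  | [] => s
  | (p, _) :: _ => { s with low := s.low.insert p (min (lowD s p) (lowD s v)) }

-- A's 'while work:' loop, one fuel unit per iteration (fuel is a guard only; it
-- is proved sufficient below, so the 'none' branch is never taken by the port).
def loopA (d : PySem.Dict Int (List Int)) : Nat → List (Int × Nat) → TjState → Option TjState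
  | 0, _, _ => none
  | _ + 1, [], s => some s
  | n + 1, (v, si) :: rest, s =>
      let succs := d.getD v []
      if si < succs.length then
        let w := succs.getD si 0
        if (s.idx.get? w).isNone then
          loopA d n ((w, 0) :: (v, si + 1) :: rest) (pushNode w s)
        else if PySem.Set.contains s.onstack w then
          loopA d n ((v, si + 1) :: rest)
            { s with low := s.low.insert v (min (lowD s v) (idxD s w)) }
        else
          loopA d n ((v, si + 1) :: rest) s
      else
        loopA d n rest (propagate rest v (rootCheck v s))

-- universe of nodes ever indexed, and the fuel bound
def univOf (adj : List (Int × List Int)) (all_nodes : List Int) : List Int :=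
  all_nodes ++ adj.map (·.1) ++ adj.flatMap (·.2)

def maxSucc (adj : List (Int × List Int)) : Nat :=
  (adj.map (fun p => p.2.length)).foldr max 0

def fuelOf (adj : List (Int × List Int)) (all_nodes : List Int) : Nat :=
  ((univOf adj all_nodes).length + 1) * (maxSucc adj + 2) + 1

-- 'if node in node_index: continue' then init node and run the while loop
def stepA (d : PySem.Dict Int (List Int)) (F : Nat) (s : TjState) (node : Int) : TjState :=
  if (s.idx.get? node).isSome then s
  else (loopA d F [(node, 0)] (pushNode node s)).getD (pushNode node s)

-- A's final filter loop over sccs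
def filtA (d : PySem.Dict Int (List Int)) (il : PySem.Set Int) (scc : List Int) : PySem.Set Int :=
  if 1 < scc.length then PySem.Set.update il scc
  else if scc.length = 1 then
    let sole := scc.getD 0 0
    if (d.getD sole []).contains sole then PySem.Set.add il sole else il
  else il

def blocks_in_nontrivial_sccs_py (adj : List (Int × List Int)) (all_nodes : List Int) : List Int :=
  ((PySem.List.sorted all_nodes (fun x => x) false).foldl
      (stepA (PySem.Dict.ofList adj) (fuelOf adj all_nodes)) tjInit).sccs.foldl
    (filtA (PySem.Dict.ofList adj)) PySem.Set.empty

-- ===== PORT B =====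

-- B's recursive 'strongconnect' from successor index si onwards (the node is
-- already initialised by its caller); a tree edge initialises w and recurses.
def goB (d : PySem.Dict Int (List Int)) : Nat → Int → Nat → TjState → Option TjState
  | 0, _, _, _ => none
  | n + 1, v, si, s =>
      let succs := d.getD v []
      if si < succs.length then
        let w := succs.getD si 0
        if (s.idx.get? w).isNone then
          match goB d n w 0 (pushNode w s) with
          | none => none
          | some s2 =>
              goB d n v (si + 1)
                { s2 with low := s2.low.insert v (min (lowD s2 v) (lowD s2 w)) }
        else if PySem.Set.contains s.onstack w then
          goB d n v (si + 1)
            { s with low := s.low.insert v (min (lowD s v) (idxD s w)) }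
        else
          goB d n v (si + 1) s
      else some (rootCheck v s)

-- 'if node not in index: strongconnect(node)'
def stepB (d : PySem.Dict Int (List Int)) (F : Nat) (s : TjState) (node : Int) : TjState :=
  if (s.idx.get? node).isNone then
    (goB d F node 0 (pushNode node s)).getD (pushNode node s)
  else s

def blocks_in_nontrivial_sccs_py_alt (adj : List (Int × List Int)) (all_nodes : List Int) : List Int :=
  PySem.Set.ofList
    ((((PySem.List.sorted all_nodes (fun x => x) false).foldl
          (stepB (PySem.Dict.ofList adj) (fuelOf adj all_nodes)) tjInit).sccs).flatMap
      (fun scc => scc.filter (fun b =>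
        decide (1 < scc.length) || ((PySem.Dict.ofList adj).getD b []).contains b)))

-- ===== PRECONDITION & SPEC =====
def Spec_blocks_in_nontrivial_sccs_py (adj : List (Int × List Int)) (all_nodes : List Int) (out : List Int) : Prop := out = blocks_in_nontrivial_sccs_py_alt adj all_nodes
instance (adj : List (Int × List Int)) (all_nodes : List Int) (out : List Int) : Decidable (Spec_blocks_in_nontrivial_sccs_py adj all_nodes out) := by unfold Spec_blocks_in_nontrivial_sccs_py; infer_instance

-- ===== CLAIM (what is proved, stated in full; the proofs are below) =====
def Claim_equal_blocks_in_nontrivial_sccs_py : Prop := ∀ (adj : List (Int × List Int)) (all_nodes : List Int), Dom_blocks_in_nontrivial_sccs_py adj all_nodes → Spec_blocks_in_nontrivial_sccs_py adj all_nodes (blocks_in_nontrivial_sccs_py adj all_nodes)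

-- ===== LEMMAS AND PROOFS =====

def InvW (d : PySem.Dict Int (List Int)) (w : List (Int × Nat)) : Prop :=
  ∀ p ∈ w, p.2 ≤ (d.getD p.1 []).length

def InvS (U : List Int) (s : TjState) : Prop :=
  s.idx.keys.Nodup ∧ ∀ k ∈ s.idx.keys, k ∈ U

def GoodD (d : PySem.Dict Int (List Int)) (U : List Int) (L : Nat) : Prop :=
  ∀ v : Int, (∀ w ∈ d.getD v [], w ∈ U) ∧ (d.getD v []).length ≤ L

theorem le_foldr_max (ls : List Nat) : ∀ x ∈ ls, x ≤ ls.foldr max 0 := by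
  induction ls with
  | nil => intro x hx; simp at hx
  | cons a t ih =>
    intro x hx
    rcases List.mem_cons.mp hx with h | h
    · subst h; simp [List.foldr]
    · exact le_trans (ih x h) (by simp [List.foldr])

theorem items_foldl_insert_sub (l : List (Int × List Int)) :
    ∀ (d : PySem.Dict Int (List Int)) (p : Int × List Int),
      p ∈ (l.foldl (fun d q => d.insert q.1 q.2) d).items → p ∈ d.items ∨ p ∈ l := by
  induction l with
  | nil => intro d p h; exact Or.inl h
  | cons a t ih =>
    intro d p h
    rcases ih (d.insert a.1 a.2) p h with h' | h'
    · rcases (PySem.Dict.mem_items_insert _ _ _ _).mp h' with h'' | h''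
      · right; rw [h'']; simp
      · exact Or.inl h''.1
    · exact Or.inr (List.mem_cons_of_mem _ h')

theorem ofList_eq_foldl_ins (l : List (Int × List Int)) :
    PySem.Dict.ofList l = l.foldl (fun d q => d.insert q.1 q.2) PySem.Dict.empty := rfl

theorem getD_ofList_cases (adj : List (Int × List Int)) (v : Int) :
    (PySem.Dict.ofList adj).getD v [] = [] ∨ (v, (PySem.Dict.ofList adj).getD v []) ∈ adj := by
  rcases hg : (PySem.Dict.ofList adj).get? v with _ | l
  · left; simp [PySem.Dict.getD_eq_get?_getD, hg]
  · right
    have hm : (v, l) ∈ (PySem.Dict.ofList adj).items := PySem.Dict.mem_items_of_get?_eq_some _ hg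
    have := items_foldl_insert_sub adj PySem.Dict.empty (v, l) (by rw [← ofList_eq_foldl_ins]; exact hm)
    rcases this with h | h
    · simp [PySem.Dict.empty] at h
    · rw [PySem.Dict.getD_eq_get?_getD, hg]; exact h

theorem goodD_ofList' (adj : List (Int × List Int)) (all_nodes : List Int) :
    GoodD (PySem.Dict.ofList adj) (univOf adj all_nodes) (maxSucc adj) := by
  intro v
  rcases getD_ofList_cases adj v with h | h
  · rw [h]; exact ⟨by intro w hw; simp at hw, by simp⟩
  constructor
  · intro w hw
    unfold univOf
    have : w ∈ adj.flatMap (·.2) := List.mem_flatMap.mpr ⟨(v, (PySem.Dict.ofList adj).getD v []), h, hw⟩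
    simp only [List.append_assoc, List.mem_append]
    tauto
  · exact le_foldr_max _ _ (List.mem_map.mpr ⟨_, h, rfl⟩)

-- state-update facts
theorem idx_rootCheck (v : Int) (s : TjState) : (rootCheck v s).idx = s.idx := by
  unfold rootCheck; split <;> rfl

theorem idx_propagate (rest : List (Int × Nat)) (v : Int) (s : TjState) :
    (propagate rest v s).idx = s.idx := by
  unfold propagate; rcases rest with _ | ⟨⟨p, q⟩, t⟩ <;> rfl

theorem idx_pushNode (w : Int) (s : TjState) :
    (pushNode w s).idx = s.idx.insert w s.counter := rfl

theorem keys_pushNode (w : Int) (s : TjState) (h : (s.idx.get? w).isNone) :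
    (pushNode w s).idx.keys = s.idx.keys ++ [w] := by
  rw [idx_pushNode]
  apply PySem.Dict.keys_insert_of_not_contains
  rw [PySem.Dict.contains_eq_isSome_get?]
  simp only [Option.isNone_iff_eq_none] at h
  rw [h]; rfl

theorem invS_pushNode {U : List Int} {s : TjState} {w : Int}
    (hs : InvS U s) (hU : w ∈ U) (h : (s.idx.get? w).isNone) :
    InvS U (pushNode w s) := by
  obtain ⟨hnd, hsub⟩ := hs
  have hwk : w ∉ s.idx.keys := by
    intro hmem
    have := (PySem.Dict.contains_iff_mem_keys (d := s.idx) (k := w)).mpr hmem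
    rw [PySem.Dict.contains_eq_isSome_get?] at this
    simp only [Option.isNone_iff_eq_none] at h
    rw [h] at this; simp at this
  constructor
  · rw [keys_pushNode w s h]
    simpa [List.nodup_append] using ⟨hnd, fun a ha => fun e => hwk (e ▸ ha)⟩
  · intro k hk
    rw [keys_pushNode w s h] at hk
    rcases List.mem_append.mp hk with h' | h'
    · exact hsub k h'
    · simp at h'; subst h'; exact hU

theorem card_pushNode {U : List Int} {s : TjState} {w : Int}
    (hU : w ∈ U) (h : (s.idx.get? w).isNone) :
    (U.toFinset \ (pushNode w s).idx.keys.toFinset).card + 1 =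
    (U.toFinset \ s.idx.keys.toFinset).card := by
  have hwk : w ∉ s.idx.keys := by
    intro hmem
    have := (PySem.Dict.contains_iff_mem_keys (d := s.idx) (k := w)).mpr hmem
    rw [PySem.Dict.contains_eq_isSome_get?] at this
    simp only [Option.isNone_iff_eq_none] at h
    rw [h] at this; simp at this
  rw [keys_pushNode w s h]
  have h1 : (s.idx.keys ++ [w]).toFinset = insert w s.idx.keys.toFinset := by
    simp [List.toFinset_append, Finset.union_comm]
  rw [h1, Finset.sdiff_insert]
  have hmem : w ∈ U.toFinset \ s.idx.keys.toFinset := by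
    simp [List.mem_toFinset.mpr hU, hwk]
  rw [Finset.card_erase_of_mem hmem]
  have : 0 < (U.toFinset \ s.idx.keys.toFinset).card := Finset.card_pos.mpr ⟨w, hmem⟩
  omega

theorem card_mono {U : List Int} {s t : TjState}
    (hsub : s.idx.keys ⊆ t.idx.keys) (_hU : ∀ k ∈ t.idx.keys, k ∈ U) :
    (U.toFinset \ t.idx.keys.toFinset).card ≤ (U.toFinset \ s.idx.keys.toFinset).card := by
  apply Finset.card_le_card
  apply Finset.sdiff_subset_sdiff (Finset.Subset.refl _)
  intro x hx
  exact List.mem_toFinset.mpr (hsub (List.mem_toFinset.mp hx))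

theorem dcard_le_len (U : List Int) (s : TjState) :
    (U.toFinset \ s.idx.keys.toFinset).card ≤ U.length :=
  le_trans (Finset.card_le_card (Finset.sdiff_subset)) (List.toFinset_card_le U)

theorem loopA_mono' (d : PySem.Dict Int (List Int)) :
    ∀ (n : Nat) (w : List (Int × Nat)) (s out : TjState),
      loopA d n w s = some out → loopA d (n + 1) w s = some out := by
  intro n
  induction n with
  | zero => intro w s out h; simp [loopA] at h
  | succ n ih =>
    intro w s out h
    match w with
    | [] => simpa [loopA] using h
    | (v, si) :: rest =>
      rw [loopA] at h ⊢
      dsimp only at h ⊢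
      split_ifs at h ⊢ <;> exact ih _ _ _ h

theorem loopA_le' (d : PySem.Dict Int (List Int)) {n m : Nat} (h : n ≤ m)
    {w : List (Int × Nat)} {s out : TjState}
    (hr : loopA d n w s = some out) : loopA d m w s = some out := by
  induction m, h using Nat.le_induction with
  | base => exact hr
  | succ m _ ih => exact loopA_mono' d m w s out ih

theorem loopA_det' (d : PySem.Dict Int (List Int)) {n m : Nat}
    {w : List (Int × Nat)} {s a b : TjState}
    (ha : loopA d n w s = some a) (hb : loopA d m w s = some b) : a = b := by
  rcases le_total n m with h | h
  · have := loopA_le' d h ha; rw [this] at hb; exact (Option.some_inj.mp hb).symm ▸ rfl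
  · have := loopA_le' d h hb; rw [this] at ha; exact (Option.some_inj.mp ha).symm

theorem filt_eq' (d : PySem.Dict Int (List Int)) :
    ∀ (sccs : List (List Int)) (il : PySem.Set Int),
      sccs.foldl (filtA d) il =
      (sccs.flatMap (fun scc =>
        scc.filter (fun b => decide (1 < scc.length) || (d.getD b []).contains b))).foldl
        PySem.Set.add il := by
  intro sccs
  induction sccs with
  | nil => intro il; rfl
  | cons scc rest ih =>
    intro il
    rw [List.foldl_cons, List.flatMap_cons, List.foldl_append, ih]
    congr 1
    by_cases h1 : 1 < scc.length
    · have hf : scc.filter (fun b => decide (1 < scc.length) || (d.getD b []).contains b) = scc := by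
        apply List.filter_eq_self.mpr
        intro b _; simp [h1]
      rw [hf]
      simp only [filtA, if_pos h1]
      rfl
    · by_cases h2 : scc.length = 1
      · obtain ⟨x, hx⟩ := List.length_eq_one_iff.mp h2
        subst hx
        simp only [filtA, h1, if_pos h2]
        by_cases hc : x ∈ d.getD x []
        · simp [hc, List.filter, PySem.Set.add]
        · simp [hc, List.filter]
      · have h0 : scc.length = 0 := by omega
        have : scc = [] := List.eq_nil_of_length_eq_zero h0
        subst this
        simp [filtA]

theorem simAB' (d : PySem.Dict Int (List Int)) :
    ∀ (n : Nat) (v : Int) (si : Nat) (s s' : TjState),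
      goB d n v si s = some s' →
      ∀ (rest : List (Int × Nat)) (out : TjState) (m : Nat),
        loopA d m rest (propagate rest v s') = some out →
        ∃ m', loopA d m' ((v, si) :: rest) s = some out := by
  intro n
  induction n with
  | zero => intro v si s s' h; simp [goB] at h
  | succ n ih =>
    intro v si s s' h rest out m hout
    rw [goB] at h
    dsimp only at h
    by_cases h1 : si < (d.getD v []).length
    · rw [if_pos h1] at h
      by_cases h2 : (s.idx.get? ((d.getD v []).getD si 0)).isNone
      · rw [if_pos h2] at h
        cases hg : goB d n ((d.getD v []).getD si 0) 0 (pushNode ((d.getD v []).getD si 0) s) with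
        | none => rw [hg] at h; simp at h
        | some s2 =>
          rw [hg] at h
          obtain ⟨m1, hm1⟩ := ih v (si + 1) _ s' h rest out m hout
          obtain ⟨m2, hm2⟩ := ih ((d.getD v []).getD si 0) 0 _ s2 hg ((v, si + 1) :: rest) out m1
            (by simpa [propagate] using hm1)
          refine ⟨m2 + 1, ?_⟩
          rw [loopA]; dsimp only
          rw [if_pos h1, if_pos h2]
          exact hm2
      · rw [if_neg h2] at h
        by_cases h3 : PySem.Set.contains s.onstack ((d.getD v []).getD si 0)
        · rw [if_pos h3] at h
          obtain ⟨m1, hm1⟩ := ih v (si + 1) _ s' h rest out m hout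
          refine ⟨m1 + 1, ?_⟩
          rw [loopA]; dsimp only
          rw [if_pos h1, if_neg h2, if_pos h3]
          exact hm1
        · rw [if_neg h3] at h
          obtain ⟨m1, hm1⟩ := ih v (si + 1) _ s' h rest out m hout
          refine ⟨m1 + 1, ?_⟩
          rw [loopA]; dsimp only
          rw [if_pos h1, if_neg h2, if_neg h3]
          exact hm1
    · rw [if_neg h1] at h
      have hs' : s' = rootCheck v s := (Option.some_inj.mp h).symm
      refine ⟨m + 1, ?_⟩
      rw [loopA]; dsimp only
      rw [if_neg h1, ← hs']
      exact hout

theorem goB_suff' (d : PySem.Dict Int (List Int)) (U : List Int) (L : Nat)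
    (hd : GoodD d U L) :
    ∀ (n : Nat) (v : Int) (si : Nat) (s : TjState), InvS U s →
      (U.toFinset \ s.idx.keys.toFinset).card * (L + 2) + ((d.getD v []).length + 1 - si) < n →
      ∃ s', goB d n v si s = some s' ∧ InvS U s' ∧ s.idx.keys ⊆ s'.idx.keys := by
  intro n
  induction n with
  | zero => intro v si s _ hm; exact absurd hm (Nat.not_lt_zero _)
  | succ n ih =>
    intro v si s hs hm
    rw [goB]; dsimp only
    by_cases h1 : si < (d.getD v []).length
    · rw [if_pos h1]
      by_cases h2 : (s.idx.get? ((d.getD v []).getD si 0)).isNone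
      · rw [if_pos h2]
        have hwmem : (d.getD v []).getD si 0 ∈ d.getD v [] := by
          rw [List.getD_eq_getElem _ _ h1]; exact List.getElem_mem h1
        have hwU : (d.getD v []).getD si 0 ∈ U := (hd v).1 _ hwmem
        have hpush := invS_pushNode hs hwU h2
        have hcard := card_pushNode (s := s) hwU h2
        have hlw : (d.getD ((d.getD v []).getD si 0) []).length ≤ L := (hd _).2
        have hmul : (U.toFinset \ s.idx.keys.toFinset).card * (L + 2) =
            (U.toFinset \ (pushNode ((d.getD v []).getD si 0) s).idx.keys.toFinset).card * (L + 2) + (L + 2) := by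
          have : (U.toFinset \ s.idx.keys.toFinset).card =
              (U.toFinset \ (pushNode ((d.getD v []).getD si 0) s).idx.keys.toFinset).card + 1 := by omega
          rw [this, Nat.succ_mul]
        rw [hmul] at hm
        have hmn : (U.toFinset \ (pushNode ((d.getD v []).getD si 0) s).idx.keys.toFinset).card * (L + 2) +
            ((d.getD ((d.getD v []).getD si 0) []).length + 1 - 0) < n := by
          generalize hP : (U.toFinset \ (pushNode ((d.getD v []).getD si 0) s).idx.keys.toFinset).card * (L + 2) = P at hm ⊢
          omega
        obtain ⟨s2, hg2, hs2, hsub2⟩ := ih _ 0 _ hpush hmn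
        rw [hg2]
        have hC : (U.toFinset \ s2.idx.keys.toFinset).card ≤
            (U.toFinset \ (pushNode ((d.getD v []).getD si 0) s).idx.keys.toFinset).card :=
          card_mono hsub2 hs2.2
        have hCmul : (U.toFinset \ s2.idx.keys.toFinset).card * (L + 2) ≤
            (U.toFinset \ (pushNode ((d.getD v []).getD si 0) s).idx.keys.toFinset).card * (L + 2) :=
          Nat.mul_le_mul_right _ hC
        have hmn2 : (U.toFinset \ s2.idx.keys.toFinset).card * (L + 2) +
            ((d.getD v []).length + 1 - (si + 1)) < n := by
          generalize hP : (U.toFinset \ (pushNode ((d.getD v []).getD si 0) s).idx.keys.toFinset).card * (L + 2) = P at hm hCmul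
          generalize hQ : (U.toFinset \ s2.idx.keys.toFinset).card * (L + 2) = Q at hCmul ⊢
          omega
        obtain ⟨s', hg3, hs3, hsub3⟩ := ih v (si + 1)
          { s2 with low := s2.low.insert v (min (lowD s2 v) (lowD s2 ((d.getD v []).getD si 0))) }
          hs2 hmn2
        refine ⟨s', hg3, hs3, ?_⟩
        have hsubpush : s.idx.keys ⊆ (pushNode ((d.getD v []).getD si 0) s).idx.keys := by
          rw [keys_pushNode _ s h2]; exact List.subset_append_left _ _
        exact fun x hx => hsub3 (hsub2 (hsubpush hx))
      · rw [if_neg h2]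
        have hmn : ∀ t : Nat, t = si + 1 →
            (U.toFinset \ s.idx.keys.toFinset).card * (L + 2) +
              ((d.getD v []).length + 1 - t) < n := by
          intro t ht
          generalize hP : (U.toFinset \ s.idx.keys.toFinset).card * (L + 2) = P at hm ⊢
          omega
        by_cases h3 : PySem.Set.contains s.onstack ((d.getD v []).getD si 0)
        · rw [if_pos h3]
          exact ih v (si + 1) _ hs (hmn _ rfl)
        · rw [if_neg h3]
          exact ih v (si + 1) s hs (hmn _ rfl)
    · rw [if_neg h1]
      refine ⟨rootCheck v s, rfl, ?_, ?_⟩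
      · unfold InvS; rw [idx_rootCheck]; exact hs
      · rw [idx_rootCheck]; exact List.Subset.refl _

theorem loopA_suff' (d : PySem.Dict Int (List Int)) (U : List Int) (L : Nat)
    (hd : GoodD d U L) :
    ∀ (n : Nat) (w : List (Int × Nat)) (s : TjState), InvS U s → InvW d w →
      (U.toFinset \ s.idx.keys.toFinset).card * (L + 2) +
        (w.map (fun p => (d.getD p.1 []).length + 1 - p.2)).sum < n →
      ∃ out, loopA d n w s = some out ∧ InvS U out := by
  intro n
  induction n with
  | zero => intro w s _ _ hm; exact absurd hm (Nat.not_lt_zero _)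
  | succ n ih =>
    intro w s hs hw hm
    rcases w with _ | ⟨⟨v, si⟩, rest⟩
    · exact ⟨s, by rw [loopA], hs⟩
    · rw [loopA]; dsimp only
      simp only [List.map_cons, List.sum_cons] at hm
      have hsi : si ≤ (d.getD v []).length := hw (v, si) (List.mem_cons_self)
      by_cases h1 : si < (d.getD v []).length
      · rw [if_pos h1]
        by_cases h2 : (s.idx.get? ((d.getD v []).getD si 0)).isNone
        · rw [if_pos h2]
          have hwmem : (d.getD v []).getD si 0 ∈ d.getD v [] := by
            rw [List.getD_eq_getElem _ _ h1]; exact List.getElem_mem h1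
          have hwU := (hd v).1 _ hwmem
          have hpush := invS_pushNode hs hwU h2
          have hcard := card_pushNode (s := s) hwU h2
          have hlw := (hd ((d.getD v []).getD si 0)).2
          have hinvw : InvW d (((d.getD v []).getD si 0, 0) :: (v, si + 1) :: rest) := by
            intro p hp
            rcases List.mem_cons.mp hp with rfl | hp2
            · exact Nat.zero_le _
            rcases List.mem_cons.mp hp2 with rfl | hp3
            · exact h1
            · exact hw p (List.mem_cons_of_mem _ hp3)
          apply ih _ _ hpush hinvw
          simp only [List.map_cons, List.sum_cons]
          have hmul : (U.toFinset \ s.idx.keys.toFinset).card * (L + 2) =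
              (U.toFinset \ (pushNode ((d.getD v []).getD si 0) s).idx.keys.toFinset).card * (L + 2) + (L + 2) := by
            have : (U.toFinset \ s.idx.keys.toFinset).card =
                (U.toFinset \ (pushNode ((d.getD v []).getD si 0) s).idx.keys.toFinset).card + 1 := by omega
            rw [this, Nat.succ_mul]
          rw [hmul] at hm
          generalize hP : (U.toFinset \ (pushNode ((d.getD v []).getD si 0) s).idx.keys.toFinset).card * (L + 2) = P at hm ⊢
          omega
        · rw [if_neg h2]
          have harith : ∀ t : TjState, t.idx = s.idx → InvS U t →
              (U.toFinset \ t.idx.keys.toFinset).card * (L + 2) +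
                ((((v, si + 1) :: rest).map (fun p => (d.getD p.1 []).length + 1 - p.2)).sum) < n := by
            intro t ht _
            rw [ht]
            simp only [List.map_cons, List.sum_cons]
            generalize hP : (U.toFinset \ s.idx.keys.toFinset).card * (L + 2) = P at hm ⊢
            omega
          have hinvw : InvW d ((v, si + 1) :: rest) := by
            intro p hp
            rcases List.mem_cons.mp hp with rfl | hp2
            · exact h1
            · exact hw p (List.mem_cons_of_mem _ hp2)
          by_cases h3 : PySem.Set.contains s.onstack ((d.getD v []).getD si 0)
          · rw [if_pos h3]
            exact ih _ _ hs hinvw (harith _ rfl hs)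
          · rw [if_neg h3]
            exact ih _ _ hs hinvw (harith _ rfl hs)
      · rw [if_neg h1]
        have hidx : (propagate rest v (rootCheck v s)).idx = s.idx := by
          rw [idx_propagate, idx_rootCheck]
        have hs' : InvS U (propagate rest v (rootCheck v s)) := by
          unfold InvS; rw [hidx]; exact hs
        have hinvw : InvW d rest := fun p hp => hw p (List.mem_cons_of_mem _ hp)
        apply ih _ _ hs' hinvw
        rw [hidx]
        generalize hP : (U.toFinset \ s.idx.keys.toFinset).card * (L + 2) = P at hm ⊢
        omega

theorem foldAB (d : PySem.Dict Int (List Int)) (U : List Int) (L : Nat) (F : Nat)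
    (hd : GoodD d U L) (hF : (U.length + 1) * (L + 2) < F) :
    ∀ (nodes : List Int) (s : TjState), InvS U s → (∀ x ∈ nodes, x ∈ U) →
      nodes.foldl (stepA d F) s = nodes.foldl (stepB d F) s ∧
        InvS U (nodes.foldl (stepA d F) s) := by
  intro nodes
  induction nodes with
  | nil => intro s hs _; exact ⟨rfl, hs⟩
  | cons x t ih =>
    intro s hs hall
    have hxU : x ∈ U := hall x List.mem_cons_self
    have hstep : stepA d F s x = stepB d F s x ∧ InvS U (stepA d F s x) := by
      by_cases hx : (s.idx.get? x).isSome
      · have hn : ¬(s.idx.get? x).isNone := by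
          rcases h : s.idx.get? x with _ | y
          · rw [h] at hx; simp at hx
          · simp
        unfold stepA stepB
        rw [if_pos hx, if_neg hn]
        exact ⟨rfl, hs⟩
      · have hnone : (s.idx.get? x).isNone := by
          rcases h : s.idx.get? x with _ | y
          · simp
          · rw [h] at hx; simp at hx
        have hpush := invS_pushNode hs hxU hnone
        have hdc := dcard_le_len U (pushNode x s)
        have hlx := (hd x).2
        have hmulU : (U.toFinset \ (pushNode x s).idx.keys.toFinset).card * (L + 2) ≤
            U.length * (L + 2) := Nat.mul_le_mul_right _ hdc
        have hexp : (U.length + 1) * (L + 2) = U.length * (L + 2) + (L + 2) := Nat.succ_mul _ _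
        have hbA : (U.toFinset \ (pushNode x s).idx.keys.toFinset).card * (L + 2) +
            (([((x : Int), (0 : Nat))].map (fun p => (d.getD p.1 []).length + 1 - p.2)).sum) < F := by
          simp only [List.map_cons, List.map_nil, List.sum_cons, List.sum_nil]
          generalize hP : (U.toFinset \ (pushNode x s).idx.keys.toFinset).card * (L + 2) = P at hmulU
          generalize hQ : U.length * (L + 2) = Q at hmulU hexp
          omega
        have hbB : (U.toFinset \ (pushNode x s).idx.keys.toFinset).card * (L + 2) +
            ((d.getD x []).length + 1 - 0) < F := by
          generalize hP : (U.toFinset \ (pushNode x s).idx.keys.toFinset).card * (L + 2) = P at hmulU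
          generalize hQ : U.length * (L + 2) = Q at hmulU hexp
          omega
        have hinvw : InvW d [((x : Int), (0 : Nat))] := by
          intro p hp
          rcases List.mem_cons.mp hp with rfl | hp2
          · exact Nat.zero_le _
          · simp at hp2
        obtain ⟨outA, hA, hsA⟩ := loopA_suff' d U L hd F [(x, 0)] (pushNode x s) hpush hinvw hbA
        obtain ⟨outB, hB, _, _⟩ := goB_suff' d U L hd F x 0 (pushNode x s) hpush hbB
        obtain ⟨m', hm'⟩ := simAB' d F x 0 (pushNode x s) outB hB [] outB 1 (by rw [loopA]; rfl)
        have heq : outA = outB := loopA_det' d hA hm'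
        constructor
        · unfold stepA stepB
          rw [if_neg hx, if_pos hnone, hA, hB]
          simpa using heq
        · unfold stepA
          rw [if_neg hx, hA]
          simpa using hsA
    rw [List.foldl_cons, List.foldl_cons, ← hstep.1]
    exact ih (stepA d F s x) hstep.2 (fun y hy => hall y (List.mem_cons_of_mem _ hy))

theorem fold_eq' (adj : List (Int × List Int)) (all_nodes : List Int) :
    (PySem.List.sorted all_nodes (fun x => x) false).foldl
        (stepA (PySem.Dict.ofList adj) (fuelOf adj all_nodes)) tjInit =
    (PySem.List.sorted all_nodes (fun x => x) false).foldl
        (stepB (PySem.Dict.ofList adj) (fuelOf adj all_nodes)) tjInit := by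
  have hd := goodD_ofList' adj all_nodes
  have hF : ((univOf adj all_nodes).length + 1) * (maxSucc adj + 2) < fuelOf adj all_nodes :=
    Nat.lt_succ_self _
  have hinit : InvS (univOf adj all_nodes) tjInit := by
    constructor
    · rw [show tjInit.idx = PySem.Dict.empty from rfl, PySem.Dict.keys_empty]
      exact List.nodup_nil
    · intro k hk
      rw [show tjInit.idx = PySem.Dict.empty from rfl, PySem.Dict.keys_empty] at hk
      simp at hk
  have hall : ∀ x ∈ PySem.List.sorted all_nodes (fun x => x) false, x ∈ univOf adj all_nodes := by
    intro x hx
    have hx' : x ∈ all_nodes := (PySem.List.mem_sorted _ _ _ _).mp hx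
    unfold univOf
    simp only [List.append_assoc, List.mem_append]
    tauto
  exact (foldAB _ _ _ _ hd hF _ tjInit hinit hall).1

-- ===== VERDICT (by name: the statement is the Claim_ definition above) =====
theorem blocks_in_nontrivial_sccs_py_spec : Claim_equal_blocks_in_nontrivial_sccs_py := by
  intro adj all_nodes _
  unfold Spec_blocks_in_nontrivial_sccs_py
  unfold blocks_in_nontrivial_sccs_py blocks_in_nontrivial_sccs_py_alt
  rw [fold_eq', filt_eq', PySem.Set.ofList_eq_foldl]; rfl
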